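-- pv_equiv track=rewrite | github.com/open-webui/open-webui | backend/open_webui/utils/chat_image_payload.py | _get_message_chain
-- ===== SOURCE A (Python) =====
-- def _get_message_chain(messages_map: dict, message_id: str) -> list[dict]:
--     if not messages_map:
--         return []
--
--     current_message = messages_map.get(message_id)
--     if not current_message:
--         return []
--
--     message_list = []
--     while current_message:
--         message_list.insert(0, current_message)
--         parent_id = current_message.get("parentId")
--         current_message = messages_map.get(parent_id) if parent_id else None
--
--     return message_list
-- ===== SOURCE B (Python) =====
-- def _get_message_chain(messages_map: dict, message_id: str) -> list[dict]:
--     current_message = messages_map.get(message_id)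
--     if not current_message:
--         return []
--     parent_id = current_message.get("parentId")
--     prefix = _get_message_chain(messages_map, parent_id) if parent_id else []
--     return prefix + [current_message]
-- ===== Notes on version B (the rewrite author's own statement) =====
-- stated objective: simpler
-- what changed: The while-loop that walks parent links and prepends with list.insert(0, ...) is replaced by a direct recursion over the parent chain that returns the recursive prefix ++ [current], yielding root-to-message order with no front insertion and no mutable accumulator.
import Mathlib
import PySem

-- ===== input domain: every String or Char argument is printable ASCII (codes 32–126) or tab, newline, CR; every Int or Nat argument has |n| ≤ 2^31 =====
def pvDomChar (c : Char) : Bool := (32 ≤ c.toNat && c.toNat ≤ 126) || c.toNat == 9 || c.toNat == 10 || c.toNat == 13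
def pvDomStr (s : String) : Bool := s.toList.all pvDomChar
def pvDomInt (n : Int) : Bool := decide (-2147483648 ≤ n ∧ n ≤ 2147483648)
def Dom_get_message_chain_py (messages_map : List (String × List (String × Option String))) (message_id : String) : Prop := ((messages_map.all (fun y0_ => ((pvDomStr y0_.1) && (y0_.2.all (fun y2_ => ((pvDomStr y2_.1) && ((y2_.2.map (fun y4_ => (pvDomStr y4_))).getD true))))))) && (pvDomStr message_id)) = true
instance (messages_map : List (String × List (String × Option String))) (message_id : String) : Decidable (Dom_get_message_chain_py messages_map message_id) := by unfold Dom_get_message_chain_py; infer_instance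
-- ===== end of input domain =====

-- B replaces A's while-loop with insert(0, …) by a recursion over the parent chain that
-- returns prefix ++ [current] (simpler; return-value equivalence; neither mutates its input).

-- ===== PORT A =====
-- current_message.get("parentId"): the value type is Option String, so a present key yields
-- some v and Python's `parent_id` is v; a missing key yields Python's None — hence .join.
def pvParentId (cur : List (String × Option String)) : Option String :=
  (List.lookup "parentId" cur).join

-- the while-loop of A; fuel (messages_map.length + 1) only makes it total in Lean,
-- the loop body is A's, step for step (message_list.insert(0, cur) = cur :: acc)
def pvLoopA (m : List (String × List (String × Option String))) :
    Nat → List (String × Option String) → List (List (String × Option String)) →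
    List (List (String × Option String))
  | 0, _, acc => acc
  | fuel + 1, cur, acc =>
    let acc' := cur :: acc
    match pvParentId cur with
    | none => acc'
    | some s =>
      if s = "" then acc'                      -- parent_id falsy → current_message = None
      else
        match List.lookup s m with
        | none => acc'                          -- parent absent → current_message = None (falsy)
        | some nxt => if nxt = [] then acc' else pvLoopA m fuel nxt acc'   -- empty dict is falsy

def get_message_chain_py (messages_map : List (String × List (String × Option String))) (message_id : String) : List (List (String × Option String)) :=
  if messages_map = [] then []
  else
    match List.lookup message_id messages_map with
    | none => []
    | some cur => if cur = [] then [] else pvLoopA messages_map (messages_map.length + 1) cur []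

-- ===== PORT B =====
-- B's recursion over the parent chain; same fuel, for totality only
def pvGoB (m : List (String × List (String × Option String))) :
    Nat → String → List (List (String × Option String))
  | 0, _ => []
  | fuel + 1, k =>
    match List.lookup k m with
    | none => []
    | some cur =>
      if cur = [] then []
      else
        (match pvParentId cur with
         | none => []
         | some s => if s = "" then [] else pvGoB m fuel s) ++ [cur]

def get_message_chain_py_alt (messages_map : List (String × List (String × Option String))) (message_id : String) : List (List (String × Option String)) :=
  pvGoB messages_map (messages_map.length + 1) message_id

-- ===== PRECONDITION & SPEC =====
-- no Pre_: the two ports agree on every input (both walk the parent chain with the same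
-- fuel bound |messages_map| + 1, which suffices wherever the chain terminates)
def Spec_get_message_chain_py (messages_map : List (String × List (String × Option String))) (message_id : String) (out : List (List (String × Option String))) : Prop := out = get_message_chain_py_alt messages_map message_id
instance (messages_map : List (String × List (String × Option String))) (message_id : String) (out : List (List (String × Option String))) : Decidable (Spec_get_message_chain_py messages_map message_id out) := by unfold Spec_get_message_chain_py; infer_instance

-- ===== CLAIM (what is proved, stated in full; the proofs are below) =====
def Claim_equal_get_message_chain_py : Prop := ∀ (messages_map : List (String × List (String × Option String))) (message_id : String), Dom_get_message_chain_py messages_map message_id → Spec_get_message_chain_py messages_map message_id (get_message_chain_py messages_map message_id)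

-- ===== LEMMAS AND PROOFS =====

-- the loop of A equals B's recursion with the accumulator appended, at every fuel
theorem pvLoopA_eq_goB (m : List (String × List (String × Option String))) :
    ∀ (fuel : Nat) (k : String) (cur : List (String × Option String))
      (acc : List (List (String × Option String))),
      List.lookup k m = some cur → cur ≠ [] →
      pvLoopA m fuel cur acc = pvGoB m fuel k ++ acc := by
  intro fuel
  induction fuel with
  | zero => intro k cur acc _ _; simp [pvLoopA, pvGoB]
  | succ f ih =>
    intro k cur acc hk hcur
    simp only [pvLoopA, pvGoB, hk, if_neg hcur]
    cases hp : pvParentId cur with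
    | none => simp
    | some s =>
      by_cases hs : s = ""
      · simp [hs]
      · simp only [if_neg hs]
        cases hl : List.lookup s m with
        | none =>
          have : pvGoB m f s = [] := by
            cases f with
            | zero => simp [pvGoB]
            | succ f' => simp [pvGoB, hl]
          simp [this]
        | some nxt =>
          by_cases hn : nxt = []
          · have : pvGoB m f s = [] := by
              cases f with
              | zero => simp [pvGoB]
              | succ f' => simp [pvGoB, hl, hn]
            simp [hn, this]
          · simp only [if_neg hn]
            rw [ih s nxt (cur :: acc) hl hn]
            simp

-- ===== VERDICT (by name: the statement is the Claim_ definition above) =====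
theorem get_message_chain_py_spec : Claim_equal_get_message_chain_py := by
  intro m id _
  unfold Spec_get_message_chain_py get_message_chain_py get_message_chain_py_alt
  by_cases hm : m = []
  · subst hm; simp [pvGoB]
  · simp only [if_neg hm]
    cases hk : List.lookup id m with
    | none => simp [pvGoB, hk]
    | some cur =>
      by_cases hc : cur = []
      · simp [pvGoB, hk, hc]
      · simp only [if_neg hc]
        rw [pvLoopA_eq_goB m (m.length + 1) id cur [] hk hc]
        simp
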